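-- pv_equiv track=rewrite | github.com/ivi982010/SySdL-TPs | Lexer.py | a_OpRel4
-- ===== SOURCE A (Python) =====
-- def a_OpRel4(tokens, acu):
-- 	s=0;
-- 	for c in acu:
-- 		if s==0 and c=='<':
-- 			s=1
-- 		elif s==1 and c=='=':
-- 			s=2
-- 		else:
-- 			s=-1
-- 			break
-- 	if s==2:
-- 		tokens.append(("<OpRel>",acu))
-- 	return s==2
-- ===== SOURCE B (Python) =====
-- def a_OpRel4(tokens, acu):
--     ok = (acu == "<=")
--     if ok:
--         tokens.append(("<OpRel>", acu))
--     return ok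
-- ===== Notes on version B (the rewrite author's own statement) =====
-- stated objective: simpler
-- what changed: Replaced the per-character state-machine loop with a single closed-form string equality acu == '<=' (same append side effect).
import Mathlib
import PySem

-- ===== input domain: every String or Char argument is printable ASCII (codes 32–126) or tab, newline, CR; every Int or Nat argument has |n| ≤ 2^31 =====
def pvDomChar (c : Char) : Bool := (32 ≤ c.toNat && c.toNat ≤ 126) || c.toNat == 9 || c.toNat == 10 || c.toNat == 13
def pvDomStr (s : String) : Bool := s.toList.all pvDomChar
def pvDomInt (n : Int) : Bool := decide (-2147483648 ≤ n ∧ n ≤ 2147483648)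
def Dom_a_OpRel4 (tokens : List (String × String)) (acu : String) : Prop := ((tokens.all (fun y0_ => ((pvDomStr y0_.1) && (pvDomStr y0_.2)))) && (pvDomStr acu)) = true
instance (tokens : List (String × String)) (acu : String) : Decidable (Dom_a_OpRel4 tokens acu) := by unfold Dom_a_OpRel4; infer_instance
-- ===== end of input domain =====

-- B replaces A's per-character state machine with the closed-form check acu == "<=";
-- both programs append ("<OpRel>", acu) to tokens exactly when they return true, and the
-- equivalence proved here is about the RETURN value only (B performs the same mutation in Python).

-- ===== PORT A =====
-- literal port of A's for-loop with break: state s, -1 acts as the broken state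
def a_OpRel4_loop : Int → List Char → Int
  | s, [] => s
  | s, c :: cs =>
    if s == 0 && c == '<' then a_OpRel4_loop 1 cs
    else if s == 1 && c == '=' then a_OpRel4_loop 2 cs
    else -1  -- break

def a_OpRel4 (tokens : List (String × String)) (acu : String) : Bool :=
  a_OpRel4_loop 0 acu.toList == 2

-- ===== PORT B =====
def a_OpRel4_alt (tokens : List (String × String)) (acu : String) : Bool :=
  acu == "<="

-- ===== PRECONDITION & SPEC =====
def Spec_a_OpRel4 (tokens : List (String × String)) (acu : String) (out : Bool) : Prop := out = a_OpRel4_alt tokens acu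
instance (tokens : List (String × String)) (acu : String) (out : Bool) : Decidable (Spec_a_OpRel4 tokens acu out) := by unfold Spec_a_OpRel4; infer_instance

-- ===== CLAIM (what is proved, stated in full; the proofs are below) =====
def Claim_equal_a_OpRel4 : Prop := ∀ (tokens : List (String × String)) (acu : String), Dom_a_OpRel4 tokens acu → Spec_a_OpRel4 tokens acu (a_OpRel4 tokens acu)

-- ===== LEMMAS AND PROOFS =====

theorem a_OpRel4_loop_two (cs : List Char) : a_OpRel4_loop 2 cs = (if cs = [] then 2 else -1) := by
  cases cs <;> simp [a_OpRel4_loop]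

theorem a_OpRel4_loop_char (l : List Char) :
    (a_OpRel4_loop 0 l == 2) = (l == ['<', '=']) := by
  match l with
  | [] => decide
  | [a] =>
      simp only [a_OpRel4_loop]
      by_cases h : a = '<' <;> simp [h]
  | a :: b :: rest =>
      simp only [a_OpRel4_loop]
      by_cases ha : a = '<'
      · by_cases hb : b = '='
        · subst ha; subst hb
          simp [a_OpRel4_loop_two]
          cases rest <;> simp
        · simp [ha, hb]
      · simp [ha]

-- ===== VERDICT (by name: the statement is the Claim_ definition above) =====
theorem a_OpRel4_spec : Claim_equal_a_OpRel4 := by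
  intro tokens acu _
  unfold Spec_a_OpRel4 a_OpRel4 a_OpRel4_alt
  rw [a_OpRel4_loop_char]
  simp [String.ext_iff]
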